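-- pv_equiv track=rewrite | github.com/cryhot/samp2symb | samp2symb/base/dfa.py | atom2letters
-- ===== SOURCE A (Python) =====
-- def atom2letters(atom_string, letter2pos, is_word):
--     # preprocessing of atom strings
--     atom_string = atom_string.replace(' ' ,'')
--
--     alphabet = list(letter2pos.keys())
--
--     atomlist = atom_string.split('|')
--     all_letter_list= set()
--     for atom_disjuncts in atomlist:
--         sign = {letter:0 for letter in alphabet}
--         if atom_string != 'true':
--             atoms = atom_disjuncts.split('&')
--             for prop in atoms:
--                 if prop[0]=='~':
--                     sign[prop[1]] = -1
--                 else: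
--                     sign[prop[0]] = 1
--         letter_list = [[]]
--         for letter in alphabet:
--             new_letter_list = []
--             if sign[letter] == 0:
--                 for l in letter_list:
--                     new_letter_list.append(l+[0])
--                     new_letter_list.append(l+[1])
--
--             if sign[letter] == 1:
--                 for l in letter_list:
--                     new_letter_list.append(l+[1])
--
--             if sign[letter] == -1:
--                 for l in letter_list:
--                     new_letter_list.append(l+[0])
--             letter_list = new_letter_list
--
--         letter_list = set([tuple(l) for l in letter_list])
--         all_letter_list= all_letter_list.union(letter_list)
--
--     return list(all_letter_list)
-- ===== SOURCE B (Python) =====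
-- def atom2letters(atom_string, letter2pos, is_word):
--     # same parsing as the original; enumeration replaced by closed-form
--     # mixed-radix index decoding instead of incrementally grown lists
--     s = atom_string.replace(' ', '')
--     alphabet = list(letter2pos.keys())
--     result = set()
--     for disj in s.split('|'):
--         sign = {a: 0 for a in alphabet}
--         if s != 'true':
--             for prop in disj.split('&'):
--                 if prop[0] == '~':
--                     sign[prop[1]] = -1
--                 else:
--                     sign[prop[0]] = 1
--         opts = [[0, 1] if sign[a] == 0 else ([1] if sign[a] == 1 else [0])
--                 for a in alphabet]
--         total = 1
--         for o in opts:
--             total *= len(o)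
--         for code in range(total):
--             vec = []
--             x = code
--             for o in reversed(opts):
--                 vec.append(o[x % len(o)])
--                 x //= len(o)
--             vec.reverse()
--             result.add(tuple(vec))
--     return list(result)
-- ===== Notes on version B (the rewrite author's own statement) =====
-- stated objective: alternative
-- what changed: Parsing of the atom string is kept identical, but the per-disjunct enumeration of satisfying letter vectors is replaced: instead of growing a list of partial vectors letter by letter (appending 0/1 copies at each step), B computes the total count and decodes each index 0..total-1 into a vector by mixed-radix divmod over the per-letter option lists.
import Mathlib
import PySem

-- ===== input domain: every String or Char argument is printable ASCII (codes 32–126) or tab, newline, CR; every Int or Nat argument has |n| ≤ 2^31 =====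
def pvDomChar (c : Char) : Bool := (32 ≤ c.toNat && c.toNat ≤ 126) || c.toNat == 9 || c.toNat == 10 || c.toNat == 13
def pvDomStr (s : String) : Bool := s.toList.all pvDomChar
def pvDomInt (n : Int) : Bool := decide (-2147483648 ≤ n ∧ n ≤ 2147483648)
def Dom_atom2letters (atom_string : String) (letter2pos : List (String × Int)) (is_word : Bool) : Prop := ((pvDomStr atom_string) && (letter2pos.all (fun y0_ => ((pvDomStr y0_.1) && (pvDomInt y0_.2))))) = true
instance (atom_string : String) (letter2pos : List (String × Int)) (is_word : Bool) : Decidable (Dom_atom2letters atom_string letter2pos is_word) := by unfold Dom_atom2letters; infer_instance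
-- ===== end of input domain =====

-- B replaces A's incrementally doubled list of partial vectors by closed-form
-- mixed-radix decoding of the vector indices 0..total-1 (objective: alternative
-- algorithm); the atom parsing is identical in both (shared helper pvSign).
-- Both Pythons return list(<set of tuples>); the result is compared as a set.

-- ===== PORT A =====
-- shared by both ports: the sign dictionary of one disjunct (identical code in Source A and Source B)
def pvSign (alphabet : List String) (s : String) (disj : String) : PySem.Dict String Int :=
  let init := alphabet.foldl (fun d a => d.insert a 0) PySem.Dict.empty
  if s = "true" then init
  else ((PySem.Str.split? disj "&").getD []).foldl
    (fun d prop =>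
      if (PySem.Str.pyGet? prop 0).getD ' ' = '~'
      then d.insert (String.ofList [(PySem.Str.pyGet? prop 1).getD ' ']) (-1)
      else d.insert (String.ofList [(PySem.Str.pyGet? prop 0).getD ' ']) 1)
    init

def atom2letters (atom_string : String) (letter2pos : List (String × Int)) (is_word : Bool) : List (List Int) :=
  let s := PySem.Str.replace atom_string " " ""
  let alphabet := (PySem.Dict.ofList letter2pos).keys
  let atomlist := (PySem.Str.split? s "|").getD []
  atomlist.foldl (fun (all : PySem.Set (List Int)) disj =>
    let sign := pvSign alphabet s disj
    let letterList := alphabet.foldl (fun (acc : List (List Int)) letter =>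
      let sg := sign.getD letter 0
      let n1 : List (List Int) := if sg = 0 then acc.flatMap (fun l => [l ++ [0], l ++ [1]]) else []
      let n2 := n1 ++ (if sg = 1 then acc.map (fun l => l ++ [1]) else [])
      n2 ++ (if sg = -1 then acc.map (fun l => l ++ [0]) else [])) [[]]
    PySem.Set.union all (PySem.Set.ofList letterList)) PySem.Set.empty

-- ===== PORT B =====
def atom2letters_alt (atom_string : String) (letter2pos : List (String × Int)) (is_word : Bool) : List (List Int) :=
  let s := PySem.Str.replace atom_string " " ""
  let alphabet := (PySem.Dict.ofList letter2pos).keys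
  ((PySem.Str.split? s "|").getD []).foldl (fun (result : PySem.Set (List Int)) disj =>
    let sign := pvSign alphabet s disj
    let opts := alphabet.map (fun a =>
      if sign.getD a 0 = 0 then [(0 : Int), 1]
      else if sign.getD a 0 = 1 then [1] else [0])
    let total := opts.foldl (fun t o => t * (o.length : Int)) 1
    (PySem.List.pyRange 0 total 1).foldl (fun res code =>
      let dec := opts.reverse.foldl
        (fun (st : List Int × Int) o =>
          (st.1 ++ [PySem.List.pyGetD o (PySem.Int.mod st.2 (o.length : Int)) 0],
           PySem.Int.floordiv st.2 (o.length : Int))) ([], code)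
      PySem.Set.add res dec.1.reverse) result) PySem.Set.empty

-- ===== PRECONDITION & SPEC =====
-- Pre_ excludes exactly the inputs on which A raises IndexError: after space removal,
-- unless the whole string is 'true', every '&'-separated prop of every '|'-disjunct
-- must be nonempty, and at least 2 characters long when it starts with '~'.
def Pre_atom2letters (atom_string : String) (letter2pos : List (String × Int)) (is_word : Bool) : Prop :=
  let s := PySem.Str.replace atom_string " " ""
  s = "true" ∨ ∀ disj ∈ (PySem.Str.split? s "|").getD [],
    ∀ prop ∈ (PySem.Str.split? disj "&").getD [],
      prop.toList ≠ [] ∧ (prop.toList.head? = some '~' → 2 ≤ prop.toList.length)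
instance (atom_string : String) (letter2pos : List (String × Int)) (is_word : Bool) : Decidable (Pre_atom2letters atom_string letter2pos is_word) := by unfold Pre_atom2letters; infer_instance

def pvWitness_atom2letters : String × (List (String × Int)) × Bool := ("a | ~b", [("a", 0), ("b", 1), ("c", 2)], true)

def Spec_atom2letters (atom_string : String) (letter2pos : List (String × Int)) (is_word : Bool) (out : List (List Int)) : Prop := out = atom2letters_alt atom_string letter2pos is_word
instance (atom_string : String) (letter2pos : List (String × Int)) (is_word : Bool) (out : List (List Int)) : Decidable (Spec_atom2letters atom_string letter2pos is_word out) := by unfold Spec_atom2letters; infer_instance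

-- ===== CLAIM (what is proved, stated in full; the proofs are below) =====
def Claim_equal_atom2letters : Prop := ∀ (atom_string : String) (letter2pos : List (String × Int)) (is_word : Bool), Dom_atom2letters atom_string letter2pos is_word → Pre_atom2letters atom_string letter2pos is_word → Spec_atom2letters atom_string letter2pos is_word (atom2letters atom_string letter2pos is_word)

-- ===== LEMMAS AND PROOFS =====

-- proof-side helpers: the mixed-radix quantities B computes, in Nat form
def pvN (os : List (List Int)) : Nat := (os.map List.length).prod

def pvDecR : List (List Int) → Nat → List Int
  | [], _ => []
  | o :: os, x => o.getD (x % o.length) 0 :: pvDecR os (x / o.length)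

lemma pv_map_getD_range {α : Type} (o : List α) (d : α) :
    (List.range o.length).map (fun r => o.getD r d) = o := by
  induction o with
  | nil => simp
  | cons a o ih =>
    rw [List.length_cons, List.range_succ_eq_map, List.map_cons, List.map_map]
    simp only [Function.comp_def, List.getD_cons_succ, List.getD_cons_zero]
    rw [ih]

lemma pv_map_eq_range {α β : Type} (o : List α) (d : α) (g : α → β) :
    o.map g = (List.range o.length).map (fun r => g (o.getD r d)) := by
  conv_lhs => rw [← pv_map_getD_range o d]
  rw [List.map_map]
  rfl

lemma pv_flatMap_singleton {α β : Type} (l : List α) (f : α → β) :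
    l.flatMap (fun x => [f x]) = l.map f := by
  induction l with
  | nil => rfl
  | cons a l ih => simp [ih]

lemma pv_range_mul {α : Type} (n m : Nat) (f : Nat → α) :
    (List.range (n * m)).map f
      = (List.range n).flatMap (fun q => (List.range m).map (fun r => f (q * m + r))) := by
  induction n with
  | zero => simp
  | succ n ih =>
    rw [Nat.succ_mul, List.range_add, List.map_append, ih, List.range_succ, List.flatMap_append]
    simp [List.map_map, Function.comp]

lemma pv_decR_append (os : List (List Int)) (o : List Int) (q r : Nat) (hr : r < o.length) :
    (pvDecR ((os ++ [o]).reverse) (q * o.length + r)).reverse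
      = (pvDecR os.reverse q).reverse ++ [o.getD r 0] := by
  have hm : 0 < o.length := Nat.lt_of_le_of_lt (Nat.zero_le r) hr
  have h1 : (q * o.length + r) % o.length = r := by
    rw [Nat.mul_comm, Nat.mul_add_mod, Nat.mod_eq_of_lt hr]
  have h2 : (q * o.length + r) / o.length = q := by
    rw [Nat.mul_comm, Nat.mul_add_div hm, Nat.div_eq_of_lt hr, Nat.add_zero]
  rw [List.reverse_append, List.reverse_singleton, List.singleton_append, pvDecR,
      h1, h2, List.reverse_cons]

lemma pv_foldl_step (os : List (List Int)) (acc : List (List Int)) :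
    os.foldl (fun acc o => acc.flatMap (fun l => o.map (fun v => l ++ [v]))) acc
      = acc.flatMap (fun l => (List.range (pvN os)).map (fun k => l ++ (pvDecR os.reverse k).reverse)) := by
  induction os using List.reverseRecOn generalizing acc with
  | nil => simp [pvN, pvDecR]
  | append_singleton os o ih =>
    rw [List.foldl_append, List.foldl_cons, List.foldl_nil, ih, List.flatMap_assoc]
    have hN : pvN (os ++ [o]) = pvN os * o.length := by simp [pvN]
    have hfun : ∀ l : List Int,
        ((List.range (pvN os)).map (fun k => l ++ (pvDecR os.reverse k).reverse)).flatMap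
            (fun l' => o.map (fun v => l' ++ [v]))
          = (List.range (pvN (os ++ [o]))).map
              (fun k => l ++ (pvDecR ((os ++ [o]).reverse) k).reverse) := by
      intro l
      have hq : ∀ q : Nat,
          o.map (fun v => (l ++ (pvDecR os.reverse q).reverse) ++ [v])
            = (List.range o.length).map
                (fun r => l ++ (pvDecR ((os ++ [o]).reverse) (q * o.length + r)).reverse) := by
        intro q
        rw [pv_map_eq_range o 0 (fun v => (l ++ (pvDecR os.reverse q).reverse) ++ [v])]
        apply List.map_congr_left
        intro r hr
        rw [pv_decR_append os o q r (List.mem_range.mp hr), ← List.append_assoc]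
      rw [hN]
      simp only [pv_range_mul, List.flatMap_map]
      simp only [hq]
    simp only [hfun]

lemma pv_decode_fold (os : List (List Int)) : ∀ (pre : List Int) (k : Nat),
    (os.foldl (fun (st : List Int × Int) o =>
        (st.1 ++ [PySem.List.pyGetD o (PySem.Int.mod st.2 (o.length : Int)) 0],
         PySem.Int.floordiv st.2 (o.length : Int))) (pre, (k : Int))).1
      = pre ++ pvDecR os k := by
  induction os with
  | nil => intro pre k; simp [pvDecR]
  | cons o os ih =>
    intro pre k
    simp only [List.foldl_cons]
    rw [PySem.Int.mod_natCast, PySem.Int.floordiv_natCast, PySem.List.pyGetD_natCast, ih]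
    simp [pvDecR, List.append_assoc]

lemma pv_total (os : List (List Int)) : ∀ (t : Nat),
    os.foldl (fun t o => t * (o.length : Int)) (t : Int) = ((t * pvN os : Nat) : Int) := by
  induction os with
  | nil => intro t; simp [pvN]
  | cons o os ih =>
    intro t
    simp only [List.foldl_cons]
    rw [← Nat.cast_mul, ih]
    simp [pvN, Nat.mul_assoc]

lemma pv_union_eq_update {α : Type} [BEq α] (s : PySem.Set α) (t : List α) :
    PySem.Set.union s t = PySem.Set.update s t := rfl

lemma pv_update_ofList {α : Type} [BEq α] [LawfulBEq α] (s : PySem.Set α) (L : List α) :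
    PySem.Set.update s (PySem.Set.ofList L) = PySem.Set.update s L := by
  rw [PySem.Set.update_eq_append_filter, PySem.Set.update_eq_append_filter,
      PySem.Set.ofList_ofList]

lemma pv_sign_init (l : List String) : ∀ (d : PySem.Dict String Int),
    (∀ x, d.getD x 0 = 0 ∨ d.getD x 0 = 1 ∨ d.getD x 0 = -1) →
    ∀ x, (l.foldl (fun d a => d.insert a 0) d).getD x 0 = 0 ∨
         (l.foldl (fun d a => d.insert a 0) d).getD x 0 = 1 ∨
         (l.foldl (fun d a => d.insert a 0) d).getD x 0 = -1 := by
  induction l with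
  | nil => intro d h; exact h
  | cons b l ih =>
    intro d h
    simp only [List.foldl_cons]
    apply ih
    intro y
    rw [PySem.Dict.getD_insert]
    split
    · left; rfl
    · exact h y

lemma pv_sign_props (ps : List String) : ∀ (d : PySem.Dict String Int),
    (∀ x, d.getD x 0 = 0 ∨ d.getD x 0 = 1 ∨ d.getD x 0 = -1) →
    ∀ x, (ps.foldl (fun d prop =>
        if (PySem.Str.pyGet? prop 0).getD ' ' = '~'
        then d.insert (String.ofList [(PySem.Str.pyGet? prop 1).getD ' ']) (-1)
        else d.insert (String.ofList [(PySem.Str.pyGet? prop 0).getD ' ']) 1) d).getD x 0 = 0 ∨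
      (ps.foldl (fun d prop =>
        if (PySem.Str.pyGet? prop 0).getD ' ' = '~'
        then d.insert (String.ofList [(PySem.Str.pyGet? prop 1).getD ' ']) (-1)
        else d.insert (String.ofList [(PySem.Str.pyGet? prop 0).getD ' ']) 1) d).getD x 0 = 1 ∨
      (ps.foldl (fun d prop =>
        if (PySem.Str.pyGet? prop 0).getD ' ' = '~'
        then d.insert (String.ofList [(PySem.Str.pyGet? prop 1).getD ' ']) (-1)
        else d.insert (String.ofList [(PySem.Str.pyGet? prop 0).getD ' ']) 1) d).getD x 0 = -1 := by
  induction ps with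
  | nil => intro d h; exact h
  | cons b ps ih =>
    intro d h
    simp only [List.foldl_cons]
    apply ih
    intro y
    by_cases hb : (PySem.Str.pyGet? b 0).getD ' ' = '~'
    · rw [if_pos hb, PySem.Dict.getD_insert]
      split
      · right; right; rfl
      · exact h y
    · rw [if_neg hb, PySem.Dict.getD_insert]
      split
      · right; left; rfl
      · exact h y

lemma pv_sign_cases (alphabet : List String) (s disj : String) (x : String) :
    (pvSign alphabet s disj).getD x 0 = 0 ∨ (pvSign alphabet s disj).getD x 0 = 1 ∨
      (pvSign alphabet s disj).getD x 0 = -1 := by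
  unfold pvSign
  have hinit := pv_sign_init alphabet PySem.Dict.empty
    (fun y => Or.inl (PySem.Dict.getD_empty y 0))
  dsimp only
  split
  · exact hinit x
  · exact pv_sign_props _ _ hinit x

lemma pv_disjunct (alphabet : List String) (sign : PySem.Dict String Int)
    (h : ∀ x, sign.getD x 0 = 0 ∨ sign.getD x 0 = 1 ∨ sign.getD x 0 = -1)
    (all : PySem.Set (List Int)) :
    PySem.Set.union all (PySem.Set.ofList (alphabet.foldl (fun (acc : List (List Int)) letter =>
        let sg := sign.getD letter 0
        let n1 : List (List Int) := if sg = 0 then acc.flatMap (fun l => [l ++ [0], l ++ [1]]) else []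
        let n2 := n1 ++ (if sg = 1 then acc.map (fun l => l ++ [1]) else [])
        n2 ++ (if sg = -1 then acc.map (fun l => l ++ [0]) else [])) [[]]))
      = (let opts := alphabet.map (fun a =>
            if sign.getD a 0 = 0 then [(0 : Int), 1]
            else if sign.getD a 0 = 1 then [1] else [0])
         let total := opts.foldl (fun t o => t * (o.length : Int)) 1
         (PySem.List.pyRange 0 total 1).foldl (fun res code =>
            let dec := opts.reverse.foldl
              (fun (st : List Int × Int) o =>
                (st.1 ++ [PySem.List.pyGetD o (PySem.Int.mod st.2 (o.length : Int)) 0],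
                 PySem.Int.floordiv st.2 (o.length : Int))) ([], code)
            PySem.Set.add res dec.1.reverse) all) := by
  dsimp only
  have hA : alphabet.foldl (fun (acc : List (List Int)) letter =>
        let sg := sign.getD letter 0
        let n1 : List (List Int) := if sg = 0 then acc.flatMap (fun l => [l ++ [0], l ++ [1]]) else []
        let n2 := n1 ++ (if sg = 1 then acc.map (fun l => l ++ [1]) else [])
        n2 ++ (if sg = -1 then acc.map (fun l => l ++ [0]) else [])) [[]]
      = alphabet.foldl (fun (acc : List (List Int)) a =>
          acc.flatMap (fun l => (if sign.getD a 0 = 0 then [(0 : Int), 1]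
            else if sign.getD a 0 = 1 then [1] else [0]).map (fun v => l ++ [v]))) [[]] := by
    apply PySem.List.foldl_congr_mem
    intro acc x _
    rcases h x with hx | hx | hx <;> simp [hx, pv_flatMap_singleton]
  rw [hA, ← List.foldl_map
    (f := fun a => if sign.getD a 0 = 0 then [(0 : Int), 1] else if sign.getD a 0 = 1 then [1] else [0])
    (g := fun (acc : List (List Int)) o => acc.flatMap (fun l => o.map (fun v => l ++ [v]))),
    pv_foldl_step]
  have htot := pv_total (alphabet.map (fun a =>
      if sign.getD a 0 = 0 then [(0 : Int), 1] else if sign.getD a 0 = 1 then [1] else [0])) 1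
  rw [Nat.cast_one] at htot
  rw [htot, Nat.one_mul, PySem.List.pyRange_zero_natCast, ← PySem.Set.update_map_eq_foldl_add,
      List.map_map, pv_union_eq_update, pv_update_ofList]
  simp only [List.flatMap_cons, List.flatMap_nil, List.append_nil, List.nil_append]
  refine congrArg (PySem.Set.update all) ?_
  apply List.map_congr_left
  intro k _
  simp only [Function.comp_apply]
  rw [pv_decode_fold]
  rw [List.nil_append]
theorem pv_main : ∀ (atom_string : String) (letter2pos : List (String × Int)) (is_word : Bool),
    atom2letters atom_string letter2pos is_word = atom2letters_alt atom_string letter2pos is_word := by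
  intro a l w
  simp only [atom2letters, atom2letters_alt]
  apply PySem.List.foldl_congr_mem
  intro all disj _
  exact pv_disjunct ((PySem.Dict.ofList l).keys)
    (pvSign ((PySem.Dict.ofList l).keys) (PySem.Str.replace a " " "") disj)
    (pv_sign_cases _ _ _) all

-- ===== VERDICT (by name: the statement is the Claim_ definition above) =====
theorem atom2letters_spec : Claim_equal_atom2letters := by
  intro a l w _ _
  unfold Spec_atom2letters
  exact pv_main a l w
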